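-- pv_equiv track=rewrite | github.com/Spidious/2022AOC | Day 8 - Treetop Tree House/treetop.py | markVisible
-- ===== SOURCE A (Python) =====
-- def markVisible(list):
--     result = []
--     highest = 0
--
--     for tree in list:
--         if(abs(tree) > highest):
--             if(tree >= 0):
--                 result.append(tree*-1)
--             else:
--                 result.append(tree)
--             highest = abs(tree)
--         else:
--             result.append(tree)
--
--     return result
-- ===== SOURCE B (Python) =====
-- def markVisible(list):
--     maxes = []
--     m = 0
--     for t in list:
--         maxes.append(m)
--         m = max(m, abs(t))
--     return [-abs(t) if abs(t) > m else t for t, m in zip(list, maxes)]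
-- ===== Notes on version B (the rewrite author's own statement) =====
-- stated objective: alternative
-- what changed: Replaces A's single stateful loop (mutable running max + branch on sign when appending) with two separate passes: first build the prefix-maximum table of absolute values, then zip and apply the unified marking rule (emit -abs(t) when abs(t) exceeds the prefix max, else t).
import Mathlib
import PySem

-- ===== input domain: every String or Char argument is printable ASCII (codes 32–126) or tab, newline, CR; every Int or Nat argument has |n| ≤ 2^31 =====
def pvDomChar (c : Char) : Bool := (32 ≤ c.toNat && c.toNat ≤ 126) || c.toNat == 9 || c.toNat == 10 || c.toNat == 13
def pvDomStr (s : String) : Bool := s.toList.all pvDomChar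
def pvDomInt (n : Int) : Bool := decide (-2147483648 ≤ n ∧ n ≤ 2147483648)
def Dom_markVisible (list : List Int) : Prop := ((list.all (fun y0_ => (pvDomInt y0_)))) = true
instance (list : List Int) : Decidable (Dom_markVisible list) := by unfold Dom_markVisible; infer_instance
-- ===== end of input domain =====

-- B separates the work into two passes — build the prefix-maximum table of |tree|, then apply
-- the marking rule by zipping — instead of A's single loop with mutable running state; objective: alternative decomposition.

-- ===== PORT A =====
-- one loop, state (result, highest); branches in A's order
def markVisible (list : List Int) : List Int :=
  (list.foldl (fun (s : List Int × Int) tree =>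
      if |tree| > s.2 then
        (if tree ≥ 0 then (s.1 ++ [tree * -1], |tree|) else (s.1 ++ [tree], |tree|))
      else (s.1 ++ [tree], s.2))
    ([], 0)).1

-- ===== PORT B =====
-- pass 1: prefix maxima of |t| (maxes[i] = running max before index i); pass 2: zip + mark
def markVisible_alt (list : List Int) : List Int :=
  let maxes := (list.foldl (fun (s : List Int × Int) t => (s.1 ++ [s.2], max s.2 |t|)) ([], 0)).1
  (list.zip maxes).map (fun p => if |p.1| > p.2 then -|p.1| else p.1)

-- ===== PRECONDITION & SPEC =====
def Spec_markVisible (list : List Int) (out : List Int) : Prop := out = markVisible_alt list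
instance (list : List Int) (out : List Int) : Decidable (Spec_markVisible list out) := by unfold Spec_markVisible; infer_instance

-- ===== CLAIM (what is proved, stated in full; the proofs are below) =====
def Claim_equal_markVisible : Prop := ∀ (list : List Int), Dom_markVisible list → Spec_markVisible list (markVisible list)

-- ===== LEMMAS AND PROOFS =====

-- reference recursion: the marked list starting from running maximum m
def markRec : List Int → Int → List Int
  | [], _ => []
  | t :: ts, m => (if |t| > m then -|t| else t) :: markRec ts (max m |t|)

-- reference recursion: the prefix-maxima table starting from m
def maxesRec : List Int → Int → List Int
  | [], _ => []
  | t :: ts, m => m :: maxesRec ts (max m |t|)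

theorem foldA_eq (l : List Int) : ∀ (res : List Int) (m : Int),
    (l.foldl (fun (s : List Int × Int) tree =>
      if |tree| > s.2 then
        (if tree ≥ 0 then (s.1 ++ [tree * -1], |tree|) else (s.1 ++ [tree], |tree|))
      else (s.1 ++ [tree], s.2)) (res, m)).1 = res ++ markRec l m := by
  induction l with
  | nil => intro res m; simp [markRec]
  | cons t ts ih =>
    intro res m
    rw [List.foldl_cons]
    by_cases h : |t| > m
    · have hm : max m |t| = |t| := max_eq_right (le_of_lt h)
      rw [if_pos h]
      by_cases h2 : t ≥ 0
      · rw [if_pos h2, ih, markRec, if_pos h, hm, abs_of_nonneg h2]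
        have : t * -1 = -t := by ring
        simp [this]
      · rw [if_neg h2, ih, markRec, if_pos h, hm,
          abs_of_neg (lt_of_not_ge h2)]
        simp
    · have hm : max m |t| = m := max_eq_left (le_of_not_gt h)
      rw [if_neg h, ih, markRec, if_neg h, hm]
      simp

theorem foldB_eq (l : List Int) : ∀ (acc : List Int) (m : Int),
    (l.foldl (fun (s : List Int × Int) t => (s.1 ++ [s.2], max s.2 |t|)) (acc, m)).1
      = acc ++ maxesRec l m := by
  induction l with
  | nil => intro acc m; simp [maxesRec]
  | cons t ts ih => intro acc m; rw [List.foldl_cons, ih, maxesRec]; simp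

theorem zip_maxes (l : List Int) : ∀ (m : Int),
    (l.zip (maxesRec l m)).map (fun p => if |p.1| > p.2 then -|p.1| else p.1) = markRec l m := by
  induction l with
  | nil => intro m; simp [maxesRec, markRec]
  | cons t ts ih =>
    intro m
    rw [maxesRec, List.zip_cons_cons, List.map_cons, ih, markRec]

-- ===== VERDICT (by name: the statement is the Claim_ definition above) =====
theorem markVisible_spec : Claim_equal_markVisible := by
  intro l _
  unfold Spec_markVisible markVisible markVisible_alt
  simp only [foldA_eq, foldB_eq, List.nil_append, zip_maxes]
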